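-- pv_equiv track=rewrite | github.com/ilambrev/Codewars | Python_Solutions/027_likes_vs_dislikes.py | like_or_dislike
-- ===== SOURCE A (Python) =====
-- def like_or_dislike(lst):
--     if not lst:
--         return 'Nothing'
--
--     is_like_pressed = False
--     is_dislike_pressed = False
--
--     for button in lst:
--         if button == 'Like':
--             is_like_pressed = not is_like_pressed
--             is_dislike_pressed = False
--         if button == 'Dislike':
--             is_dislike_pressed = not is_dislike_pressed
--             is_like_pressed = False
--
--     if not is_like_pressed and not is_dislike_pressed:
--         return 'Nothing'
--
--     if is_like_pressed:
--         return 'Like'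
--
--     if is_dislike_pressed:
--         return 'Dislike'
-- ===== SOURCE B (Python) =====
-- def like_or_dislike(lst):
--     presses = [b for b in lst if b == 'Like' or b == 'Dislike']
--     return _final_from_presses(presses)
--
--
-- def _final_from_presses(presses):
--     # Only the trailing run of the last pressed button matters:
--     # the state just before that run is never that button, so k presses
--     # of it leave the button iff k is odd, 'Nothing' iff k is even.
--     rev = presses[::-1]
--     if not rev:
--         return 'Nothing'
--     last = rev[0]
--     run = 0
--     for b in rev:
--         if b != last:
--             break
--         run += 1
--     return last if run % 2 == 1 else 'Nothing'
-- ===== Notes on version B (the rewrite author's own statement) =====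
-- stated objective: alternative
-- what changed: Replaces the forward boolean state machine with a filter-then-backward-scan: collect the Like/Dislike presses, then look only at the trailing run of the last pressed button and decide by its parity (odd = that button, even = Nothing).
import Mathlib
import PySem

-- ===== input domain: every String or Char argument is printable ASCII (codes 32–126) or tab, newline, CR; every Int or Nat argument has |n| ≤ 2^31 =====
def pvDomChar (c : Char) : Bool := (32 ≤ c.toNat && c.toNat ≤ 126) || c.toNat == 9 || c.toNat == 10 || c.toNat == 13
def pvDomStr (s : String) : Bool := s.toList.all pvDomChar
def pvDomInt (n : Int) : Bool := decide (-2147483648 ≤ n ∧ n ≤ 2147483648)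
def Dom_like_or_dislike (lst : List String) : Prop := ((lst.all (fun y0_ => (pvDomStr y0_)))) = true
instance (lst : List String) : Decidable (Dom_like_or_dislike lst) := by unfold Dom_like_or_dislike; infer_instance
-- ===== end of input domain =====

-- B replaces A's forward boolean state machine by a backward scan: only the parity
-- of the trailing run of the last Like/Dislike press matters. Return values only.

-- ===== PORT A =====
-- A: two toggle booleans, then mapped to a string at the end.
def likeStepA (p : Bool × Bool) (button : String) : Bool × Bool :=
  let p := if button = "Like" then (!p.1, false) else p
  let p := if button = "Dislike" then (false, !p.2) else p
  p

def like_or_dislike (lst : List String) : String :=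
  if lst = [] then "Nothing"
  else
    let p := lst.foldl likeStepA (false, false)
    if !p.1 && !p.2 then "Nothing"
    else if p.1 then "Like"
    else "Dislike"

-- ===== PORT B =====
-- length of the initial run of `tgt` (the Python for-loop with break, counting `run`)
def runLen (tgt : String) : List String → Nat
  | [] => 0
  | b :: rest => if b = tgt then runLen tgt rest + 1 else 0

def finalFromPresses (presses : List String) : String :=
  match presses.reverse with
  | [] => "Nothing"
  | last :: rev => if runLen last (last :: rev) % 2 = 1 then last else "Nothing"

def like_or_dislike_alt (lst : List String) : String :=
  finalFromPresses (lst.filter (fun b => b == "Like" || b == "Dislike"))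

-- ===== PRECONDITION & SPEC =====
def Spec_like_or_dislike (lst : List String) (out : String) : Prop := out = like_or_dislike_alt lst
instance (lst : List String) (out : String) : Decidable (Spec_like_or_dislike lst out) := by unfold Spec_like_or_dislike; infer_instance

-- ===== CLAIM (what is proved, stated in full; the proofs are below) =====
def Claim_equal_like_or_dislike : Prop := ∀ (lst : List String), Dom_like_or_dislike lst → Spec_like_or_dislike lst (like_or_dislike lst)

-- ===== LEMMAS AND PROOFS =====

-- tri-state abstraction of A's boolean pair, used only in the proof
def likeStepT (state button : String) : String :=
  if button = "Like" ∨ button = "Dislike" then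
    (if state = button then "Nothing" else button)
  else state

def encState (p : Bool × Bool) : String :=
  if p.1 then "Like" else if p.2 then "Dislike" else "Nothing"

theorem likeStep_comm (p : Bool × Bool) (h : ¬ (p.1 ∧ p.2)) (b : String) :
    encState (likeStepA p b) = likeStepT (encState p) b ∧ ¬ ((likeStepA p b).1 ∧ (likeStepA p b).2) := by
  obtain ⟨l, d⟩ := p
  by_cases h1 : b = "Like" <;> by_cases h2 : b = "Dislike" <;>
    cases l <;> cases d <;>
      simp_all [likeStepA, likeStepT, encState]

theorem fold_comm (lst : List String) (p : Bool × Bool) (h : ¬ (p.1 ∧ p.2)) :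
    encState (lst.foldl likeStepA p) = lst.foldl likeStepT (encState p) := by
  induction lst generalizing p with
  | nil => rfl
  | cons b rest ih =>
      obtain ⟨h1, h2⟩ := likeStep_comm p h b
      simp only [List.foldl_cons, h1.symm]
      exact ih _ h2

-- one press of a Like/Dislike button advances finalFromPresses exactly like likeStepT
theorem step_final (ps : List String) (b : String) (hb : b = "Like" ∨ b = "Dislike") :
    likeStepT (finalFromPresses ps) b = finalFromPresses (ps ++ [b]) := by
  have hnb : b ≠ "Nothing" := by rcases hb with h | h <;> subst h <;> decide
  have hrev : (ps ++ [b]).reverse = b :: ps.reverse := by simp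
  rcases h : ps.reverse with _ | ⟨last, rev⟩
  · simp [finalFromPresses, h, hrev, likeStepT, hb, runLen]
  · by_cases hlb : last = b
    · subst hlb
      simp only [finalFromPresses, h, hrev, runLen]
      rcases Nat.mod_two_eq_zero_or_one (runLen last rev) with he | he
      · have h1 : (runLen last rev + 1) % 2 = 1 := by omega
        have h2 : (runLen last rev + 1 + 1) % 2 ≠ 1 := by omega
        simp [likeStepT, hb, h1, h2]
      · have h1 : (runLen last rev + 1) % 2 ≠ 1 := by omega
        have h2 : (runLen last rev + 1 + 1) % 2 = 1 := by omega
        simp [likeStepT, hb, h1, h2, hnb.symm]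
    · have hstep : runLen b (b :: last :: rev) = 1 := by
        simp [runLen, hlb]
      simp only [finalFromPresses, h, hrev, hstep]
      by_cases hp : runLen last (last :: rev) % 2 = 1
      · simp [likeStepT, hb, hp, hlb]
      · simp [likeStepT, hb, hp, hnb.symm]

theorem fold_final (lst : List String) (ps : List String) :
    lst.foldl likeStepT (finalFromPresses ps) =
      finalFromPresses (ps ++ lst.filter (fun b => b == "Like" || b == "Dislike")) := by
  induction lst generalizing ps with
  | nil => simp
  | cons b rest ih =>
      by_cases hb : b = "Like" ∨ b = "Dislike"
      · have hf : (b == "Like" || b == "Dislike") = true := by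
          rcases hb with h | h <;> simp [h]
        simp only [List.foldl_cons, step_final ps b hb, List.filter_cons, hf, if_pos]
        rw [ih (ps ++ [b])]
        simp
      · rw [not_or] at hb
        have hf : (b == "Like" || b == "Dislike") = false := by
          simp [hb.1, hb.2]
        have hstep : likeStepT (finalFromPresses ps) b = finalFromPresses ps := by
          simp [likeStepT, hb.1, hb.2]
        simp only [List.foldl_cons, hstep, List.filter_cons, hf]
        exact ih ps

-- ===== VERDICT (by name: the statement is the Claim_ definition above) =====
theorem like_or_dislike_spec : Claim_equal_like_or_dislike := by
  intro lst _
  unfold Spec_like_or_dislike like_or_dislike like_or_dislike_alt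
  have hT : encState (lst.foldl likeStepA (false, false)) = lst.foldl likeStepT "Nothing" :=
    fold_comm lst (false, false) (by simp)
  have hF : lst.foldl likeStepT (finalFromPresses []) =
      finalFromPresses (lst.filter (fun b => b == "Like" || b == "Dislike")) := by
    simpa using fold_final lst []
  have hnil : finalFromPresses [] = "Nothing" := rfl
  rw [hnil] at hF
  by_cases he : lst = []
  · subst he; simp [finalFromPresses]
  · simp only [he, if_false]
    rw [← hF, ← hT]
    rcases h : lst.foldl likeStepA (false, false) with ⟨l, d⟩
    cases l <;> cases d <;> simp [encState]
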